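-- pv_equiv track=rewrite | github.com/Kemuel-M/SD_paxos_docker | cluster_store/synchronization.py | _find_latest_version
-- ===== SOURCE A (Python) =====
-- from typing import Dict, Any, List, Optional, Tuple, Set
--
-- def _find_latest_version(resource_id: str, resources_metadata: Dict[int, Dict[str, Dict[str, Any]]]) -> Tuple[Optional[int], Optional[Dict[str, Any]]]:
--     """
--     Encontra o nó com a versão mais recente de um recurso.
--
--     Args:
--         resource_id: ID do recurso
--         resources_metadata: Metadados coletados de todos os nós
--
--     Returns:
--         Tuple[Optional[int], Optional[Dict[str, Any]]]:
--             (node_id com versão mais recente, metadados mais recentes)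
--             ou (None, None) se nenhum nó tiver o recurso
--     """
--     latest_node_id = None
--     latest_metadata = None
--
--     for node_id, node_metadata in resources_metadata.items():
--         if resource_id in node_metadata:
--             current_metadata = node_metadata[resource_id]
--
--             if latest_metadata is None:
--                 latest_node_id = node_id
--                 latest_metadata = current_metadata
--                 continue
--
--             # Compara versões
--             current_version = current_metadata.get("version", 0)
--             latest_version = latest_metadata.get("version", 0)
--
--             if current_version > latest_version:
--                 # Versão mais recente
--                 latest_node_id = node_id
--                 latest_metadata = current_metadata
--             elif current_version == latest_version:
--                 # Versões iguais, compara timestamp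
--                 current_timestamp = current_metadata.get("timestamp", 0)
--                 latest_timestamp = latest_metadata.get("timestamp", 0)
--
--                 if current_timestamp > latest_timestamp:
--                     # Timestamp mais recente
--                     latest_node_id = node_id
--                     latest_metadata = current_metadata
--                 elif current_timestamp == latest_timestamp:
--                     # Timestamps iguais, maior node_id vence
--                     current_node_id = current_metadata.get("node_id", 0)
--                     latest_node_owner = latest_metadata.get("node_id", 0)
--
--                     if current_node_id > latest_node_owner:
--                         latest_node_id = node_id
--                         latest_metadata = current_metadata
--
--     return latest_node_id, latest_metadata
-- ===== SOURCE B (Python) =====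
-- def _find_latest_version(resource_id, resources_metadata):
--     def key(md):
--         return (md.get("version", 0), md.get("timestamp", 0), md.get("node_id", 0))
--
--     candidates = [(node_id, node_metadata[resource_id])
--                   for node_id, node_metadata in resources_metadata.items()
--                   if resource_id in node_metadata]
--     if not candidates:
--         return None, None
--     # staged passes: first compute the best key, then scan for the first
--     # candidate that achieves it (first-wins on ties, like A's keep-first loop)
--     best = max(key(md) for _, md in candidates)
--     return next((node_id, md) for node_id, md in candidates if key(md) == best)
-- ===== Notes on version B (the rewrite author's own statement) =====
-- stated objective: alternative
-- what changed: Replaces A's single accumulate-the-best loop with its explicit version/timestamp/node_id comparison cascade by three staged passes: filter the nodes holding the resource, compute the maximal (version, timestamp, node_id) key tuple with a plain max(), then scan for the first candidate whose key equals that maximum.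
import Mathlib
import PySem

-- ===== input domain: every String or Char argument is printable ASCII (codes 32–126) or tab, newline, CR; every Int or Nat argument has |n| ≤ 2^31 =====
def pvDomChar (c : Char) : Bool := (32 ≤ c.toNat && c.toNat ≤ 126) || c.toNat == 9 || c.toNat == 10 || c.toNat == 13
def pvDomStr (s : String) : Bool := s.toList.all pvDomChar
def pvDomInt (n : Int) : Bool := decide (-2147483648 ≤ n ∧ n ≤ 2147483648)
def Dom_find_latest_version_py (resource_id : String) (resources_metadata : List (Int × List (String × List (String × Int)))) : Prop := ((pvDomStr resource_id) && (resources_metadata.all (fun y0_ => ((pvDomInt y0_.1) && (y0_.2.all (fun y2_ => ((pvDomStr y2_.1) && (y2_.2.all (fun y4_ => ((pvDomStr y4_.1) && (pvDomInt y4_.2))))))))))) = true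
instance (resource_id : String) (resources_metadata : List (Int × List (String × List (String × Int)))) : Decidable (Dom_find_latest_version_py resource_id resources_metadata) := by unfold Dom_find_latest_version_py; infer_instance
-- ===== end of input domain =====

-- B replaces A's accumulate-the-best loop by staged passes: filter the candidates, compute the
-- maximal (version, timestamp, node_id) key, then scan for the first candidate achieving it
-- (objective: alternative decomposition, same cost).

-- shared dict primitives (association lists; lookup = first match, per the type convention)
def pvLookup (nm : List (String × List (String × Int))) (k : String) : Option (List (String × Int)) :=
  (nm.find? (fun p => p.1 == k)).map (·.2)

def pvGetD (md : List (String × Int)) (k : String) (d : Int) : Int :=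
  match md.find? (fun p => p.1 == k) with
  | some p => p.2
  | none => d

-- ===== PORT A =====
-- A's loop body: keep-first running best with an explicit version / timestamp / node_id cascade
def pvStepA (resource_id : String) (st : Option Int × Option (List (String × Int)))
    (p : Int × List (String × List (String × Int))) : Option Int × Option (List (String × Int)) :=
  match pvLookup p.2 resource_id with
  | none => st
  | some cur =>
    match st with
    | (_, none) => (some p.1, some cur)
    | (ln?, some latest) =>
      let cv := pvGetD cur "version" 0
      let lv := pvGetD latest "version" 0
      if cv > lv then (some p.1, some cur)
      else if cv = lv then
        let ct := pvGetD cur "timestamp" 0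
        let lt' := pvGetD latest "timestamp" 0
        if ct > lt' then (some p.1, some cur)
        else if ct = lt' then
          if pvGetD cur "node_id" 0 > pvGetD latest "node_id" 0 then (some p.1, some cur)
          else (ln?, some latest)
        else (ln?, some latest)
      else (ln?, some latest)

def find_latest_version_py (resource_id : String) (resources_metadata : List (Int × List (String × List (String × Int)))) : Option Int × (Option (List (String × Int))) :=
  resources_metadata.foldl (pvStepA resource_id) (none, none)

-- ===== PORT B =====
-- key of a candidate's metadata: the tuple (version, timestamp, node_id)
def pvKeyB (md : List (String × Int)) : Int × Int × Int :=
  (pvGetD md "version" 0, pvGetD md "timestamp" 0, pvGetD md "node_id" 0)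

-- Python's '<' on int 3-tuples, hand-ported (lexicographic; exact on Int triples)
def pvKeyLt (a b : Int × Int × Int) : Bool :=
  decide (a.1 < b.1 ∨ (a.1 = b.1 ∧ (a.2.1 < b.2.1 ∨ (a.2.1 = b.2.1 ∧ a.2.2 < b.2.2))))

-- max(ks) on a nonempty list of int 3-tuples, hand-ported (running lexicographic max;
-- Mathlib's max on products is pointwise, not Python's tuple order, so it is not used)
def pvMaxKey (k0 : Int × Int × Int) (ks : List (Int × Int × Int)) : Int × Int × Int :=
  ks.foldl (fun a b => if pvKeyLt a b then b else a) k0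

def find_latest_version_py_alt (resource_id : String) (resources_metadata : List (Int × List (String × List (String × Int)))) : Option Int × (Option (List (String × Int))) :=
  let candidates := resources_metadata.filterMap
    (fun p => (pvLookup p.2 resource_id).map (fun md => (p.1, md)))
  match candidates with
  | [] => (none, none)
  | h :: t =>
    let best := pvMaxKey (pvKeyB h.2) (t.map (fun c => pvKeyB c.2))
    -- next(...): the first candidate whose key equals the maximum; always found, so getD's
    -- default is never used
    let w := ((h :: t).find? (fun c => pvKeyB c.2 == best)).getD h
    (some w.1, some w.2)

-- ===== PRECONDITION & SPEC =====
def Spec_find_latest_version_py (resource_id : String) (resources_metadata : List (Int × List (String × List (String × Int)))) (out : Option Int × (Option (List (String × Int)))) : Prop := out = find_latest_version_py_alt resource_id resources_metadata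
instance (resource_id : String) (resources_metadata : List (Int × List (String × List (String × Int)))) (out : Option Int × (Option (List (String × Int)))) : Decidable (Spec_find_latest_version_py resource_id resources_metadata out) := by unfold Spec_find_latest_version_py; infer_instance

-- ===== CLAIM (what is proved, stated in full; the proofs are below) =====
def Claim_equal_find_latest_version_py : Prop := ∀ (resource_id : String) (resources_metadata : List (Int × List (String × List (String × Int)))), Dom_find_latest_version_py resource_id resources_metadata → Spec_find_latest_version_py resource_id resources_metadata (find_latest_version_py resource_id resources_metadata)

-- ===== LEMMAS AND PROOFS =====

lemma pvKeyLt_irrefl (a : Int × Int × Int) : pvKeyLt a a = false := by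
  simp [pvKeyLt]

lemma pvKeyLt_asymm (a b : Int × Int × Int) (h : pvKeyLt a b = true) : pvKeyLt b a = false := by
  simp only [pvKeyLt, decide_eq_true_eq, decide_eq_false_iff_not] at *
  omega

lemma pvKeyLe_trans (a b c : Int × Int × Int) (h1 : pvKeyLt b a = false)
    (h2 : pvKeyLt c b = false) : pvKeyLt c a = false := by
  simp only [pvKeyLt, decide_eq_false_iff_not] at *
  omega

lemma pvKeyLt_of_lt_of_ge (a b c : Int × Int × Int) (h1 : pvKeyLt a b = true)
    (h2 : pvKeyLt c b = false) : pvKeyLt a c = true := by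
  simp only [pvKeyLt, decide_eq_true_eq, decide_eq_false_iff_not] at *
  omega

lemma pvKeyLt_of_ne (a b : Int × Int × Int) (hne : a ≠ b) (h : pvKeyLt a b = false) :
    pvKeyLt b a = true := by
  obtain ⟨a1, a2, a3⟩ := a; obtain ⟨b1, b2, b3⟩ := b
  simp only [pvKeyLt, decide_eq_false_iff_not, decide_eq_true_eq, Prod.mk.injEq] at *
  by_contra hc
  simp only [not_or, not_and, not_lt] at hc h
  apply hne
  have h3 : a1 = b1 ∧ a2 = b2 ∧ a3 = b3 := by omega
  simp [h3.1, h3.2.1, h3.2.2]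

-- the running lexicographic max is ≥ its initial value
lemma pvMaxKey_ge (ks : List (Int × Int × Int)) (a : Int × Int × Int) :
    pvKeyLt (pvMaxKey a ks) a = false := by
  induction ks generalizing a with
  | nil => exact pvKeyLt_irrefl a
  | cons b t ih =>
    simp only [pvMaxKey, List.foldl_cons]
    cases hb : pvKeyLt a b with
    | false => simpa [hb] using ih a
    | true =>
      simp only [hb, if_true]
      exact pvKeyLe_trans a b (pvMaxKey b t) (pvKeyLt_asymm a b hb) (ih b)

-- B's staged selection (max key, then first match) equals the first-wins running max of the
-- candidates themselves
lemma find_best (t : List (Int × List (String × Int))) (h : Int × List (String × Int)) :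
    (h :: t).find? (fun c => pvKeyB c.2 == pvMaxKey (pvKeyB h.2) (t.map (fun c => pvKeyB c.2)))
      = some (t.foldl (fun best c => if pvKeyLt (pvKeyB best.2) (pvKeyB c.2) then c else best) h) := by
  induction t generalizing h with
  | nil => simp [pvMaxKey]
  | cons c t' ih =>
    have hstep : pvMaxKey (pvKeyB h.2) ((c :: t').map (fun c => pvKeyB c.2))
        = pvMaxKey (pvKeyB (if pvKeyLt (pvKeyB h.2) (pvKeyB c.2) then c else h).2)
            (t'.map (fun c => pvKeyB c.2)) := by
      simp only [List.map_cons, pvMaxKey, List.foldl_cons]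
      split_ifs <;> rfl
    cases hc : pvKeyLt (pvKeyB h.2) (pvKeyB c.2) with
    | true =>
      -- h is strictly below c, hence strictly below the max: the scan skips h
      have hmax := pvMaxKey_ge (t'.map (fun c => pvKeyB c.2)) (pvKeyB c.2)
      have hlt : pvKeyLt (pvKeyB h.2) (pvMaxKey (pvKeyB c.2) (t'.map (fun c => pvKeyB c.2))) = true :=
        pvKeyLt_of_lt_of_ge _ _ _ hc hmax
      have hhne : (pvKeyB h.2 == pvMaxKey (pvKeyB h.2) ((c :: t').map (fun c => pvKeyB c.2))) = false := by
        rw [hstep]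
        simp only [hc, if_true, beq_eq_false_iff_ne, ne_eq]
        intro he
        rw [← he, pvKeyLt_irrefl] at hlt
        exact Bool.false_ne_true hlt
      simp only [List.find?_cons, hhne, Bool.false_eq_true, if_false]
      have := ih c
      rw [hstep]
      simp only [hc, if_true]
      simp only [List.foldl_cons, hc, if_true]
      exact this
    | false =>
      -- c is ≤ h: h stays the accumulator, and c can never be the first max when h is not
      have hB : pvMaxKey (pvKeyB h.2) ((c :: t').map (fun c => pvKeyB c.2))
          = pvMaxKey (pvKeyB h.2) (t'.map (fun c => pvKeyB c.2)) := by
        rw [hstep]; simp [hc]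
      rw [hB]
      simp only [List.foldl_cons, hc, Bool.false_eq_true, if_false]
      have := ih h
      cases hh : (pvKeyB h.2 == pvMaxKey (pvKeyB h.2) (t'.map (fun c => pvKeyB c.2))) with
      | true =>
        simp only [List.find?_cons, hh, if_true] at this ⊢
        exact this
      | false =>
        have hcne : (pvKeyB c.2 == pvMaxKey (pvKeyB h.2) (t'.map (fun c => pvKeyB c.2))) = false := by
          simp only [beq_eq_false_iff_ne, ne_eq] at hh ⊢
          intro he
          have hge := pvMaxKey_ge (t'.map (fun c => pvKeyB c.2)) (pvKeyB h.2)
          have hlt := pvKeyLt_of_ne (pvMaxKey (pvKeyB h.2) (t'.map (fun c => pvKeyB c.2))) (pvKeyB h.2)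
            (fun he2 => hh he2.symm) hge
          rw [← he, hc] at hlt
          exact Bool.false_ne_true hlt
        simp only [List.find?_cons, hh, hcne, Bool.false_eq_true, if_false] at this ⊢
        exact this

-- the two ports agree
lemma ports_agree (rid : String) (rm : List (Int × List (String × List (String × Int)))) :
    find_latest_version_py rid rm = find_latest_version_py_alt rid rm := by
  unfold find_latest_version_py find_latest_version_py_alt
  -- A's fold over rm is the first-wins running max over the candidate list
  suffices hmain : ∀ (cs : List (Int × List (String × Int))),
      cs = rm.filterMap (fun p => (pvLookup p.2 rid).map (fun md => (p.1, md))) →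
      rm.foldl (pvStepA rid) (none, none) =
        (match cs with
         | [] => (none, none)
         | h :: t =>
           (some ((t.foldl (fun best c => if pvKeyLt (pvKeyB best.2) (pvKeyB c.2) then c else best) h).1),
            some ((t.foldl (fun best c => if pvKeyLt (pvKeyB best.2) (pvKeyB c.2) then c else best) h).2))) by
    rw [hmain _ rfl]
    cases hcs : rm.filterMap (fun p => (pvLookup p.2 rid).map (fun md => (p.1, md))) with
    | nil => rfl
    | cons h t =>
      simp only
      rw [find_best t h]
      rfl
  intro cs hcs
  subst hcs
  induction rm with
  | nil => rfl
  | cons p t ih =>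
    cases h : pvLookup p.2 rid with
    | none =>
      simp only [List.foldl_cons, List.filterMap_cons, h, Option.map_none]
      have : pvStepA rid (none, none) p = (none, none) := by simp [pvStepA, h]
      rw [this]; exact ih
    | some cur =>
      simp only [List.foldl_cons, List.filterMap_cons, h, Option.map_some]
      have h0 : pvStepA rid (none, none) p = (some p.1, some cur) := by simp [pvStepA, h]
      rw [h0]
      -- from a populated state A's remaining fold is the running max from (p.1, cur)
      clear ih h h0
      induction t generalizing p cur with
      | nil => rfl
      | cons q t' ih' =>
        cases hq : pvLookup q.2 rid with
        | none =>
          simp only [List.foldl_cons, List.filterMap_cons, hq, Option.map_none]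
          have : pvStepA rid (some p.1, some cur) q = (some p.1, some cur) := by
            simp [pvStepA, hq]
          rw [this]
          exact ih' p cur
        | some cur' =>
          simp only [List.foldl_cons, List.filterMap_cons, hq, Option.map_some]
          have hstA : pvStepA rid (some p.1, some cur) q =
              (if pvKeyLt (pvKeyB cur) (pvKeyB cur') then ((some q.1 : Option Int), (some cur' : Option (List (String × Int)))) else (some p.1, some cur)) := by
            simp only [pvStepA, hq, pvKeyLt, pvKeyB]
            split_ifs <;> simp_all <;> omega
          rw [hstA]
          cases hk : pvKeyLt (pvKeyB cur) (pvKeyB cur') with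
          | false =>
            simp only [hk, Bool.false_eq_true, if_false, reduceIte, List.foldl_cons]
            simpa only [hk, Bool.false_eq_true, if_false, reduceIte] using ih' p cur
          | true =>
            simp only [hk, if_true, reduceIte, List.foldl_cons]
            simpa only [hk, if_true, reduceIte] using ih' q cur'

-- ===== VERDICT (by name: the statement is the Claim_ definition above) =====
theorem find_latest_version_py_spec : Claim_equal_find_latest_version_py :=
  fun rid rm _ => ports_agree rid rm
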